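-- pv_equiv track=rewrite | github.com/kornai/4lang | exp/corp/utils.py | get_tsv_sens
-- ===== SOURCE A (Python) =====
-- def get_tsv_sens(stream):
--     curr_sen = []
--     for raw_line in stream:
--         line = raw_line.strip()
--         if not line or line.startswith('#'):
--             if curr_sen:
--                 yield curr_sen
--                 curr_sen = []
--         else:
--             fields = line.split('\t')
--             curr_sen.append(fields)
--
--     if curr_sen:
--         yield curr_sen
-- ===== SOURCE B (Python) =====
-- def get_tsv_sens(stream):
--     lines = [raw_line.strip() for raw_line in stream]
--     n = len(lines)
--     i = 0
--     while i < n: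
--         if not lines[i] or lines[i].startswith('#'):
--             i += 1
--             continue
--         j = i
--         while j < n and lines[j] and not lines[j].startswith('#'):
--             j += 1
--         yield [line.split('\t') for line in lines[i:j]]
--         i = j
-- ===== Notes on version B (the rewrite author's own statement) =====
-- stated objective: alternative
-- what changed: Replaces the accumulator-and-flush loop (append fields, flush on separator and at EOF) by a two-pointer run scan: strip all lines once, then repeatedly skip separator lines and emit each maximal run of content lines as one sentence, with no carried accumulator or end-of-stream flush.
import Mathlib
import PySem

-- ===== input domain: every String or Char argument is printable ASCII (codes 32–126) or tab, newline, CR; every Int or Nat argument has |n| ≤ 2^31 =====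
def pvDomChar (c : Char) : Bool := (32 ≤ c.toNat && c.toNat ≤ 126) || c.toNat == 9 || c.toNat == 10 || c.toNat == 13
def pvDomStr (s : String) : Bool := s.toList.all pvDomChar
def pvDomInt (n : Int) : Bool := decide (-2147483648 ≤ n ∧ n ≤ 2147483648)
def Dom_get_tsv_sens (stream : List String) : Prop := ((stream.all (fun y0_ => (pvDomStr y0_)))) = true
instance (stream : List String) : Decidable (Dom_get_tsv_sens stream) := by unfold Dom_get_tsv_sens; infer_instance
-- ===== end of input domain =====

-- B replaces A's accumulator-and-flush loop by a strip pass plus a two-pointer run scan; same cost, no carried accumulator (objective: alternative). The generator is ported as the list of its yields.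

-- ===== PORT A =====
-- line.split('\t'): split? is some whenever the separator is nonempty
def splitTab (s : String) : List String := (PySem.Str.split? s "\t").getD []

-- one step of A's for-loop over state (yielded-so-far, curr_sen)
def stepA (st : List (List (List String)) × List (List String)) (raw_line : String) :
    List (List (List String)) × List (List String) :=
  let line := PySem.Str.strip raw_line
  if line = "" || PySem.Str.startswith line "#" then
    if st.2 ≠ [] then (st.1 ++ [st.2], []) else st
  else
    (st.1, st.2 ++ [splitTab line])

def get_tsv_sens (stream : List String) : List (List (List String)) :=
  let st := stream.foldl stepA ([], [])
  if st.2 ≠ [] then st.1 ++ [st.2] else st.1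

-- ===== PORT B =====
-- a stripped line is a separator iff it is empty or starts with '#'
def contLine (t : String) : Bool := !(t = "" || PySem.Str.startswith t "#")

-- outer while loop of Source B: skip separators, else emit the maximal content run (inner while = span)
def runScan : List String → List (List (List String))
  | [] => []
  | t :: ts =>
    if contLine t then
      ((t :: (ts.takeWhile contLine)).map (fun u => splitTab u))
        :: runScan (ts.dropWhile contLine)
    else
      runScan ts
termination_by ts => ts.length
decreasing_by
  · exact Nat.lt_succ_of_le (ts.length_dropWhile_le contLine)
  · exact Nat.lt_succ_self _

def get_tsv_sens_alt (stream : List String) : List (List (List String)) :=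
  runScan (stream.map PySem.Str.strip)

-- ===== PRECONDITION & SPEC =====
def Spec_get_tsv_sens (stream : List String) (out : List (List (List String))) : Prop := out = get_tsv_sens_alt stream
instance (stream : List String) (out : List (List (List String))) : Decidable (Spec_get_tsv_sens stream out) := by unfold Spec_get_tsv_sens; infer_instance

-- ===== CLAIM (what is proved, stated in full; the proofs are below) =====
def Claim_equal_get_tsv_sens : Prop := ∀ (stream : List String), Dom_get_tsv_sens stream → Spec_get_tsv_sens stream (get_tsv_sens stream)

-- ===== LEMMAS AND PROOFS =====

theorem stepA_sep (st : List (List (List String)) × List (List String)) (l : String)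
    (h : PySem.Str.strip l = "" ∨ PySem.Str.startswith (PySem.Str.strip l) "#" = true) :
    stepA st l = if st.2 ≠ [] then (st.1 ++ [st.2], []) else st := by
  simp only [stepA]
  rw [if_pos]
  simpa using h

theorem stepA_cont (st : List (List (List String)) × List (List String)) (l : String)
    (h : ¬ (PySem.Str.strip l = "" ∨ PySem.Str.startswith (PySem.Str.strip l) "#" = true)) :
    stepA st l = (st.1, st.2 ++ [splitTab (PySem.Str.strip l)]) := by
  simp only [stepA]
  rw [if_neg]
  simpa using h

-- B's value with a pending (possibly nonempty) current sentence merged into the first run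
def runScanPre (curr : List (List String)) (ts : List String) : List (List (List String)) :=
  if curr = [] then runScan ts
  else (curr ++ (ts.takeWhile contLine).map (fun u => splitTab u))
        :: runScan (ts.dropWhile contLine)

-- A's loop, continued from state (acc, curr) and finished, equals acc ++ B's run scan with curr pending
theorem foldA_eq_runScanPre (ls : List String) : ∀ (acc : List (List (List String))) (curr : List (List String)),
    (let st := ls.foldl stepA (acc, curr)
     if st.2 ≠ [] then st.1 ++ [st.2] else st.1)
      = acc ++ runScanPre curr (ls.map PySem.Str.strip) := by
  induction ls with
  | nil =>
    intro acc curr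
    by_cases h : curr = [] <;> simp [runScanPre, runScan, h]
  | cons l ls ih =>
    intro acc curr
    simp only [List.foldl_cons, List.map_cons]
    by_cases hP : (PySem.Str.strip l = "" ∨ PySem.Str.startswith (PySem.Str.strip l) "#" = true)
    · have hc : contLine (PySem.Str.strip l) = false := by
        rcases hP with h | h
        · simp [contLine, h]
        · simp at h
          simp [contLine, h]
      rw [stepA_sep _ _ hP]
      by_cases hcur : curr = []
      · simp [hcur, ih, runScanPre, runScan, hc]
      · simp [hcur, ih, runScanPre, runScan, hc]
    · have hc : contLine (PySem.Str.strip l) = true := by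
        rw [not_or] at hP
        have h2 : PySem.Str.startswith (PySem.Str.strip l) "#" = false :=
            Bool.eq_false_iff.mpr hP.2
        simp at h2
        simp [contLine, hP.1, h2]
      rw [stepA_cont _ _ hP]
      by_cases hcur : curr = []
      · simp [hcur, ih, runScanPre, runScan, hc]
      · simp [hcur, ih, runScanPre, hc]

-- ===== VERDICT (by name: the statement is the Claim_ definition above) =====
theorem get_tsv_sens_spec : Claim_equal_get_tsv_sens := by
  intro stream _
  unfold Spec_get_tsv_sens get_tsv_sens get_tsv_sens_alt
  simpa [runScanPre] using foldA_eq_runScanPre stream [] []
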